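-- pv_equiv track=rewrite | github.com/BCCDC-PHL/fluviewer-nf | bin/tools.py | get_mutations
-- ===== SOURCE A (Python) =====
-- def get_mutations(ref, qry):
-- 	mutations = []
-- 	insertion = ''
-- 	deletion = ''
--
-- 	ref_pos = 0
-- 	qry_pos = 0
-- 	for ref_char, qry_char in zip(ref, qry):
-- 		# increment the ref_pos at any valid reference position
-- 		if ref_char != '-':
-- 			ref_pos += 1
-- 		if qry_pos != '-':
-- 			qry_pos += 1
--
-- 		if ref_char == '-':     # insertion
-- 			if deletion:
-- 				mutations += [(deletion, ref_pos-1, "-")]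
-- 				deletion = ""
-- 			insertion += qry_char
-- 		elif qry_char == '-':   # deletion
-- 			if insertion:
-- 				mutations += [("-", ref_pos-1, insertion)]
-- 				insertion = ""
-- 			deletion += ref_char
--
-- 		else:					# neither insertion nor deletion
-- 			if insertion:
-- 				mutations += [("-", ref_pos-1, insertion)]
-- 				insertion = ""
-- 			if deletion:
-- 				mutations += [(deletion, ref_pos-1, "-")]
-- 				deletion = ""
--
-- 			if ref_char != qry_char and qry_char not in ['X', 'N'] and ref_char not in ['X', 'N']: # standard snp mismatch
-- 				mutations += [(ref_char, ref_pos, qry_char)]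
--
-- 	return mutations
-- ===== SOURCE B (Python) =====
-- def _columns(ref, qry):
--     # one pass: classify each aligned column and record the running ref position
--     cols = []
--     pos = 0
--     for r, q in zip(ref, qry):
--         if r != '-':
--             pos += 1
--         kind = 'I' if r == '-' else ('D' if q == '-' else 'M')
--         cols.append((kind, r, q, pos))
--     return cols
--
-- def _runs(cols):
--     # group consecutive columns of the same kind, built back-to-front;
--     # runs and each run are kept reversed while building so growth is O(1)
--     rruns = []
--     for c in reversed(cols):
--         if rruns and rruns[-1][-1][0] == c[0]:
--             rruns[-1].append(c)
--         else:
--             rruns.append([c])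
--     rruns.reverse()
--     for g in rruns:
--         g.reverse()
--     return rruns
--
-- def _emit(runs):
--     # an indel run is reported when the next run starts; a trailing indel run
--     # is never reported (as in the original)
--     out = []
--     for i, grp in enumerate(runs):
--         kind = grp[0][0]
--         if kind == 'M':
--             out += [(r, p, q) for _, r, q, p in grp
--                     if r != q and q not in ['X', 'N'] and r not in ['X', 'N']]
--         elif i + 1 < len(runs):
--             flush_pos = runs[i + 1][0][3] - 1
--             if kind == 'I':
--                 out.append(('-', flush_pos, ''.join(c[2] for c in grp)))
--             else:
--                 out.append((''.join(c[1] for c in grp), flush_pos, '-'))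
--     return out
--
-- def get_mutations(ref, qry):
--     return _emit(_runs(_columns(ref, qry)))
-- ===== Notes on version B (the rewrite author's own statement) =====
-- stated objective: alternative
-- what changed: B replaces A's inline state machine (mutable insertion/deletion string buffers flushed mid-loop) by a three-stage pipeline: annotate columns with kind and ref position, group consecutive columns into runs, then emit one tuple per indel run (positioned by the next run's first column) and SNP tuples from match runs.
import Mathlib
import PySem

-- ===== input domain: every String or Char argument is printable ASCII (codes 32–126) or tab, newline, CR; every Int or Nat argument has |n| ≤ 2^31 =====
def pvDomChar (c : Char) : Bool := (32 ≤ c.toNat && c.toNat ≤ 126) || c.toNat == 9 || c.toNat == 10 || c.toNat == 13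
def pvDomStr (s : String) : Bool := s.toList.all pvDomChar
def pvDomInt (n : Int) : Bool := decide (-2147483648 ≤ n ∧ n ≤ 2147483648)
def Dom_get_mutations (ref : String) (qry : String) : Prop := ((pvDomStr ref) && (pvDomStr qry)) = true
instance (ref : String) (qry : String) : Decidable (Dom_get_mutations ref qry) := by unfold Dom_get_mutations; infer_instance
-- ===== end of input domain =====

-- B re-decomposes A's inline buffer state machine into annotate-columns / group-runs /
-- emit-per-run stages; same return value, no speed claim.

-- ===== PORT A =====
-- Python string buffers `insertion`/`deletion` are modelled as List Char (char by char,
-- exactly as `+=` grows them); String.mk converts a buffer at the moment it is emitted.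
-- `qry_pos` (dead variable, its guard `qry_pos != '-'` is always true in Python) is kept.
def aStep (st : List (String × Int × String) × List Char × List Char × Int × Int)
    (rq : Char × Char) : List (String × Int × String) × List Char × List Char × Int × Int :=
  let muts := st.1
  let ins := st.2.1
  let del := st.2.2.1
  let refPos := if rq.1 ≠ '-' then st.2.2.2.1 + 1 else st.2.2.2.1
  let qryPos := st.2.2.2.2 + 1
  if rq.1 = '-' then
    let p := if del ≠ [] then (muts ++ [(String.mk del, refPos - 1, "-")], ([] : List Char)) else (muts, del)
    (p.1, ins ++ [rq.2], p.2, refPos, qryPos)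
  else if rq.2 = '-' then
    let p := if ins ≠ [] then (muts ++ [("-", refPos - 1, String.mk ins)], ([] : List Char)) else (muts, ins)
    (p.1, p.2, del ++ [rq.1], refPos, qryPos)
  else
    let p := if ins ≠ [] then (muts ++ [("-", refPos - 1, String.mk ins)], ([] : List Char)) else (muts, ins)
    let p2 := if del ≠ [] then (p.1 ++ [(String.mk del, refPos - 1, "-")], ([] : List Char)) else (p.1, del)
    let muts2 := if rq.1 ≠ rq.2 ∧ rq.2 ∉ ['X', 'N'] ∧ rq.1 ∉ ['X', 'N']
      then p2.1 ++ [(String.mk [rq.1], refPos, String.mk [rq.2])] else p2.1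
    (muts2, p.2, p2.2, refPos, qryPos)

def get_mutations (ref : String) (qry : String) : List (String × Int × String) :=
  ((ref.toList.zip qry.toList).foldl aStep ([], [], [], 0, 0)).1

-- ===== PORT B =====
-- column = (kind, ref char, qry char, ref position after this column)
def bCols : List (Char × Char) → Int → List (Char × Char × Char × Int)
  | [], _ => []
  | (r, q) :: rest, pos =>
    let pos' := if r ≠ '-' then pos + 1 else pos
    let k := if r = '-' then 'I' else if q = '-' then 'D' else 'M'
    (k, r, q, pos') :: bCols rest pos'

-- one step of Source B's reversed-order grouping loop (prepend, merging equal kinds)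
def bMerge (c : Char × Char × Char × Int) (runs : List (List (Char × Char × Char × Int))) :
    List (List (Char × Char × Char × Int)) :=
  match runs with
  | (d :: g) :: gs => if d.1 = c.1 then (c :: d :: g) :: gs else [c] :: (d :: g) :: gs
  | gs => [c] :: gs

def bRuns (cols : List (Char × Char × Char × Int)) : List (List (Char × Char × Char × Int)) :=
  cols.foldr bMerge []

def bSnp (c : Char × Char × Char × Int) : Option (String × Int × String) :=
  if c.2.1 ≠ c.2.2.1 ∧ c.2.2.1 ∉ ['X', 'N'] ∧ c.2.1 ∉ ['X', 'N']
  then some (String.mk [c.2.1], c.2.2.2, String.mk [c.2.2.1]) else none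

def bEmit : List (List (Char × Char × Char × Int)) → List (String × Int × String)
  | [] => []
  | g :: rest =>
    (match g with
     | [] => []
     | c :: _ =>
       if c.1 = 'M' then g.filterMap bSnp
       else
         match rest with
         | (c' :: _) :: _ =>
           if c.1 = 'I' then [("-", c'.2.2.2 - 1, String.mk (g.map (fun d => d.2.2.1)))]
           else [(String.mk (g.map (fun d => d.2.1)), c'.2.2.2 - 1, "-")]
         | _ => []) ++ bEmit rest

def get_mutations_alt (ref : String) (qry : String) : List (String × Int × String) :=
  bEmit (bRuns (bCols (ref.toList.zip qry.toList) 0))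

-- ===== PRECONDITION & SPEC =====
def Spec_get_mutations (ref : String) (qry : String) (out : List (String × Int × String)) : Prop := out = get_mutations_alt ref qry
instance (ref : String) (qry : String) (out : List (String × Int × String)) : Decidable (Spec_get_mutations ref qry out) := by unfold Spec_get_mutations; infer_instance

-- ===== CLAIM (what is proved, stated in full; the proofs are below) =====
def Claim_equal_get_mutations : Prop := ∀ (ref : String) (qry : String), Dom_get_mutations ref qry → Spec_get_mutations ref qry (get_mutations ref qry)

-- ===== LEMMAS AND PROOFS =====

-- a pending indel run, stripped to (kind, ref char, qry char)
def pvStrip (c : Char × Char × Char × Int) : Char × Char × Char := (c.1, c.2.1, c.2.2.1)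

def pvFlush (pend : List (Char × Char × Char)) (p : Int) : List (String × Int × String) :=
  match pend with
  | [] => []
  | d :: _ =>
    if d.1 = 'I' then [("-", p - 1, String.mk (pend.map (fun c => c.2.2)))]
    else [(String.mk (pend.map (fun c => c.2.1)), p - 1, "-")]

-- reference state machine: pending indel run + remaining columns
def pvGo : List (Char × Char × Char) → List (Char × Char × Char × Int) → List (String × Int × String)
  | _, [] => []
  | pend, c :: cs =>
    if c.1 = 'M' then pvFlush pend c.2.2.2 ++ (bSnp c).toList ++ pvGo [] cs
    else
      match pend with
      | [] => pvGo [pvStrip c] cs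
      | d :: _ =>
        if d.1 = c.1 then pvGo (pend ++ [pvStrip c]) cs
        else pvFlush pend c.2.2.2 ++ pvGo [pvStrip c] cs

def pvPend (ins del : List Char) : List (Char × Char × Char) :=
  if ins ≠ [] then ins.map (fun q => ('I', '-', q)) else del.map (fun r => ('D', r, '-'))

lemma bRuns_cons_shape (c : Char × Char × Char × Int) (cs : List (Char × Char × Char × Int)) :
    ∃ g gs, bRuns (c :: cs) = (c :: g) :: gs := by
  show ∃ g gs, bMerge c (bRuns cs) = (c :: g) :: gs
  cases h : bRuns cs with
  | nil => exact ⟨[], [], rfl⟩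
  | cons g0 gs0 =>
    cases g0 with
    | nil => exact ⟨[], [] :: gs0, rfl⟩
    | cons d g =>
      by_cases hd : d.1 = c.1
      · exact ⟨d :: g, gs0, by simp [bMerge, hd]⟩
      · exact ⟨[], (d :: g) :: gs0, by simp [bMerge, hd]⟩

lemma bRuns_pend_split (pend : List (Char × Char × Char × Int)) (k : Char)
    (hp : ∀ c ∈ pend, c.1 = k) (hne : pend ≠ [])
    (l : List (Char × Char × Char × Int))
    (hl : l = [] ∨ ∃ c cs, l = c :: cs ∧ c.1 ≠ k) :
    bRuns (pend ++ l) = pend :: bRuns l := by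
  induction pend with
  | nil => exact absurd rfl hne
  | cons a p ih =>
    cases p with
    | nil =>
      rcases hl with rfl | ⟨c, cs, rfl, hck⟩
      · simp [bRuns, bMerge]
      · obtain ⟨g, gs, hg⟩ := bRuns_cons_shape c cs
        have hak : a.1 = k := hp a (by simp)
        show bMerge a (bRuns (c :: cs)) = [a] :: bRuns (c :: cs)
        rw [hg]
        have : ¬ c.1 = a.1 := fun h => hck (by rw [h, hak])
        simp [bMerge, this]
    | cons b p' =>
      have hrec : bRuns ((b :: p') ++ l) = (b :: p') :: bRuns l :=
        ih (fun c hc => hp c (List.mem_cons_of_mem a hc)) (by simp)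
      show bMerge a (bRuns ((b :: p') ++ l)) = (a :: b :: p') :: bRuns l
      rw [hrec]
      have : b.1 = a.1 := by rw [hp b (by simp), hp a (by simp)]
      simp [bMerge, this]

lemma bEmit_runs_M_cons (c : Char × Char × Char × Int) (l : List (Char × Char × Char × Int))
    (hc : c.1 = 'M') :
    bEmit (bRuns (c :: l)) = (bSnp c).toList ++ bEmit (bRuns l) := by
  show bEmit (bMerge c (bRuns l)) = _
  cases h : bRuns l with
  | nil => simp [bMerge, bEmit, hc, List.filterMap]; cases bSnp c <;> simp
  | cons g0 gs0 =>
    cases g0 with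
    | nil => simp [bMerge, bEmit, hc, List.filterMap]; cases bSnp c <;> simp
    | cons d g =>
      by_cases hd : d.1 = c.1
      · simp [bMerge, hd, bEmit, hc, List.filterMap_cons]
        cases bSnp c <;> simp
      · have hdm : ¬ d.1 = 'M' := fun h => hd (h.trans hc.symm)
        simp [bMerge, hdm, bEmit, hc, List.filterMap_cons]
        cases bSnp c <;> simp

lemma bEmit_pend_cons (d : Char × Char × Char × Int) (p : List (Char × Char × Char × Int))
    (c : Char × Char × Char × Int) (g : List (Char × Char × Char × Int))
    (gs : List (List (Char × Char × Char × Int))) (hdM : d.1 ≠ 'M') :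
    bEmit ((d :: p) :: (c :: g) :: gs) =
      pvFlush (List.map pvStrip (d :: p)) c.2.2.2 ++ bEmit ((c :: g) :: gs) := by
  simp only [bEmit, pvFlush, pvStrip, List.map_cons, List.map_map]
  rw [if_neg hdM]
  by_cases hdI : d.1 = 'I' <;> simp [hdI, pvStrip, Function.comp_def]

lemma pvGo_main (l : List (Char × Char × Char × Int)) :
    ∀ pend : List (Char × Char × Char × Int),
      (∀ c ∈ pend, ∀ d ∈ pend, c.1 = d.1) → (∀ c ∈ pend, c.1 ≠ 'M') →
      bEmit (bRuns (pend ++ l)) = pvGo (pend.map pvStrip) l := by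
  induction l with
  | nil =>
    intro pend hhom hnm
    cases pend with
    | nil => simp [bRuns, bEmit, pvGo]
    | cons d p =>
      have hs := bRuns_pend_split (d :: p) d.1 (fun c hc => hhom c hc d (by simp)) (by simp) [] (Or.inl rfl)
      simp only [List.append_nil] at hs ⊢
      rw [hs]
      simp [bRuns, bEmit, pvGo, hnm d (by simp)]
  | cons c cs ih =>
    intro pend hhom hnm
    by_cases hM : c.1 = 'M'
    · cases pend with
      | nil =>
        have htail := ih [] (by simp) (by simp)
        simp only [List.nil_append, List.map_nil] at htail
        simp only [List.nil_append, List.map_nil]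
        rw [bEmit_runs_M_cons c cs hM, htail]
        simp [pvGo, hM, pvFlush]
      | cons d p =>
        have hdM : d.1 ≠ 'M' := hnm d (by simp)
        have hdk : ∀ x ∈ d :: p, x.1 = d.1 := fun x hx => hhom x hx d (by simp)
        obtain ⟨g, gs, hg⟩ := bRuns_cons_shape c cs
        have htail := ih [] (by simp) (by simp)
        simp only [List.nil_append, List.map_nil] at htail
        have hrest : bEmit (bRuns (c :: cs)) = (bSnp c).toList ++ bEmit (bRuns cs) :=
          bEmit_runs_M_cons c cs hM
        rw [bRuns_pend_split (d :: p) d.1 hdk (by simp) (c :: cs)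
            (Or.inr ⟨c, cs, rfl, by rw [hM]; exact fun h => hdM h.symm⟩),
          hg, bEmit_pend_cons d p c g gs hdM, ← hg, hrest, htail]
        simp [pvGo, hM, List.append_assoc]
    · cases pend with
      | nil =>
        have := ih [c] (by simp) (by simp [hM])
        simpa [pvGo, hM] using this
      | cons d p =>
        by_cases hdc : d.1 = c.1
        · have hpend' : ∀ x ∈ (d :: p) ++ [c], x.1 = d.1 := by
            intro x hx
            rcases List.mem_append.1 hx with hx | hx
            · exact hhom x hx d (by simp)
            · simp at hx; subst hx; exact hdc.symm
          have hrec := ih ((d :: p) ++ [c])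
            (fun x hx y hy => (hpend' x hx).trans (hpend' y hy).symm)
            (fun x hx => by rw [hpend' x hx]; exact hnm d (by simp))
          rw [List.append_assoc] at hrec
          simp only [List.singleton_append] at hrec
          rw [hrec]
          simp [pvGo, hM, hdc, pvStrip, List.map_append]
        · have hdk : ∀ x ∈ d :: p, x.1 = d.1 := fun x hx => hhom x hx d (by simp)
          obtain ⟨g, gs, hg⟩ := bRuns_cons_shape c cs
          have htail := ih [c] (by simp) (by simp [hM])
          simp only [List.singleton_append, List.map_cons, List.map_nil] at htail
          rw [bRuns_pend_split (d :: p) d.1 hdk (by simp) (c :: cs)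
              (Or.inr ⟨c, cs, rfl, fun h => hdc h.symm⟩),
            hg, bEmit_pend_cons d p c g gs (hnm d (by simp)), ← hg, htail]
          simp [pvGo, hM, hdc, pvStrip]

lemma aFold_eq_go (cs : List (Char × Char)) :
    ∀ (muts : List (String × Int × String)) (ins del : List Char) (pos qpos : Int),
      (ins = [] ∨ del = []) →
      (cs.foldl aStep (muts, ins, del, pos, qpos)).1 = muts ++ pvGo (pvPend ins del) (bCols cs pos) := by
  induction cs with
  | nil => intro muts ins del pos qpos _; simp [bCols, pvGo]
  | cons rq cs ih =>
    intro muts ins del pos qpos hid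
    obtain ⟨r, q⟩ := rq
    by_cases hr : r = '-'
    · -- insertion column: flush deletion if pending, extend insertion
      rcases hid with hins | hdel
      · subst hins
        cases del with
        | nil =>
          rw [List.foldl_cons, show aStep (muts, [], [], pos, qpos) (r, q) =
              (muts, [q], [], pos, qpos + 1) by simp [aStep, hr]]
          rw [ih muts [q] [] pos (qpos + 1) (Or.inr rfl)]
          simp [bCols, hr, pvGo, pvPend, pvStrip]
        | cons d0 ds =>
          rw [List.foldl_cons, show aStep (muts, [], d0 :: ds, pos, qpos) (r, q) =
              (muts ++ [(String.mk (d0 :: ds), pos - 1, "-")], [q], [], pos, qpos + 1) by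
                simp [aStep, hr]]
          rw [ih _ [q] [] pos (qpos + 1) (Or.inr rfl)]
          simp [bCols, hr, pvGo, pvPend, pvStrip, pvFlush, List.map_map, Function.comp_def,
            List.append_assoc]
      · subst hdel
        cases ins with
        | nil =>
          rw [List.foldl_cons, show aStep (muts, [], [], pos, qpos) (r, q) =
              (muts, [q], [], pos, qpos + 1) by simp [aStep, hr]]
          rw [ih muts [q] [] pos (qpos + 1) (Or.inr rfl)]
          simp [bCols, hr, pvGo, pvPend, pvStrip]
        | cons i0 is =>
          rw [List.foldl_cons, show aStep (muts, i0 :: is, [], pos, qpos) (r, q) =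
              (muts, (i0 :: is) ++ [q], [], pos, qpos + 1) by simp [aStep, hr]]
          rw [ih muts ((i0 :: is) ++ [q]) [] pos (qpos + 1) (Or.inr rfl)]
          simp [bCols, hr, pvGo, pvPend, pvStrip, List.map_append]
    · by_cases hq : q = '-'
      · -- deletion column
        rcases hid with hins | hdel
        · subst hins
          rw [List.foldl_cons, show aStep (muts, [], del, pos, qpos) (r, q) =
              (muts, [], del ++ [r], pos + 1, qpos + 1) by simp [aStep, hr, hq]]
          rw [ih muts [] (del ++ [r]) (pos + 1) (qpos + 1) (Or.inl rfl)]
          cases del with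
          | nil => simp [bCols, hr, hq, pvGo, pvPend, pvStrip]
          | cons d0 ds =>
            simp [bCols, hr, hq, pvGo, pvPend, pvStrip, List.map_append]
        · subst hdel
          cases ins with
          | nil =>
            rw [List.foldl_cons, show aStep (muts, [], [], pos, qpos) (r, q) =
                (muts, [], [r], pos + 1, qpos + 1) by simp [aStep, hr, hq]]
            rw [ih muts [] [r] (pos + 1) (qpos + 1) (Or.inl rfl)]
            simp [bCols, hr, hq, pvGo, pvPend, pvStrip]
          | cons i0 is =>
            rw [List.foldl_cons, show aStep (muts, i0 :: is, [], pos, qpos) (r, q) =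
                (muts ++ [("-", pos + 1 - 1, String.mk (i0 :: is))], [], [r], pos + 1, qpos + 1) by
                  simp [aStep, hr, hq]]
            rw [ih _ [] [r] (pos + 1) (qpos + 1) (Or.inl rfl)]
            simp [bCols, hr, hq, pvGo, pvPend, pvStrip, pvFlush, List.map_map, Function.comp_def,
              List.append_assoc]
      · -- match/mismatch column
        have hstep : aStep (muts, ins, del, pos, qpos) (r, q) =
            (((if ins ≠ [] then muts ++ [("-", pos + 1 - 1, String.mk ins)] else muts) ++
              (if del ≠ [] then [(String.mk del, pos + 1 - 1, "-")] else [])) ++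
              (if r ≠ q ∧ q ∉ ['X', 'N'] ∧ r ∉ ['X', 'N']
                then [(String.mk [r], pos + 1, String.mk [q])] else []),
             [], [], pos + 1, qpos + 1) := by
          simp only [aStep, hr, hq]
          split_ifs <;> simp_all
        rw [List.foldl_cons, hstep, ih _ [] [] (pos + 1) (qpos + 1) (Or.inl rfl)]
        have hsnp : (bSnp ('M', r, q, pos + 1)).toList =
            (if r ≠ q ∧ q ∉ ['X', 'N'] ∧ r ∉ ['X', 'N']
              then [(String.mk [r], pos + 1, String.mk [q])] else []) := by
          simp only [bSnp]; split_ifs <;> simp_all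
        have hflush : pvFlush (pvPend ins del) (pos + 1) =
            (if ins ≠ [] then [("-", pos + 1 - 1, String.mk ins)] else []) ++
            (if del ≠ [] then [(String.mk del, pos + 1 - 1, "-")] else []) := by
          rcases hid with hins | hdel
          · subst hins
            cases del with
            | nil => simp [pvPend, pvFlush]
            | cons d0 ds => simp [pvPend, pvFlush, List.map_map, Function.comp_def]
          · subst hdel
            cases ins with
            | nil => simp [pvPend, pvFlush]
            | cons i0 is => simp [pvPend, pvFlush, List.map_map, Function.comp_def]
        have hcol : bCols ((r, q) :: cs) pos = ('M', r, q, pos + 1) :: bCols cs (pos + 1) := by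
          simp [bCols, hr, hq]
        rw [hcol]
        have hgo : pvGo (pvPend ins del) (('M', r, q, pos + 1) :: bCols cs (pos + 1)) =
            pvFlush (pvPend ins del) (pos + 1) ++ (bSnp ('M', r, q, pos + 1)).toList ++
              pvGo [] (bCols cs (pos + 1)) := by
          cases hp : pvPend ins del <;> simp [pvGo]
        rw [hgo, hflush, hsnp]
        split_ifs <;> simp [pvPend]

-- ===== VERDICT (by name: the statement is the Claim_ definition above) =====
theorem get_mutations_spec : Claim_equal_get_mutations := by
  intro ref qry _
  show get_mutations ref qry = get_mutations_alt ref qry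
  rw [get_mutations, get_mutations_alt,
    aFold_eq_go (ref.toList.zip qry.toList) [] [] [] 0 0 (Or.inl rfl)]
  have := pvGo_main (bCols (ref.toList.zip qry.toList) 0) [] (by simp) (by simp)
  simpa [pvPend] using this.symm
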